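-- pv_equiv track=rewrite | github.com/pleielp/apss-py | chapter10/MATCHORDER/jiho.py | solution
-- ===== SOURCE A (Python) =====
-- def solution(russians:list, koreans:list):
--     BEST_RATING = -1
--     WORST_RATING = 0
--
--     russians.sort()
--     koreans.sort()
--     win_count = 0
--
--     def get_lower_bound(lo, hi):
--         while lo < hi:
--             mid = (hi + lo) // 2
--             if koreans[mid] >= russians[BEST_RATING]:
--                 hi = mid
--             else:
--                 lo = mid + 1
--         return hi
--
--     while russians:
--         if russians[BEST_RATING] > koreans[BEST_RATING]:
--             koreans.pop(WORST_RATING)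
--         else:
--             least_rating_korean = get_lower_bound(0, len(koreans)-1)
--             koreans.pop(least_rating_korean)
--             win_count += 1
--         russians.pop(BEST_RATING)
--     return win_count
-- ===== SOURCE B (Python) =====
-- def solution(russians: list, koreans: list):
--     rs = sorted(russians)
--     ks = sorted(koreans)
--     count = 0
--     j = 0
--     for r in rs:
--         while j < len(ks) and ks[j] < r:
--             j += 1
--         if j < len(ks):
--             count += 1
--             j += 1
--     return count
-- ===== Notes on version B (the rewrite author's own statement) =====
-- stated objective: faster
-- what changed: Replaced A's destructive loop (repeatedly popping the top russian and either the worst korean or a binary-searched lower-bound korean) by a single bottom-up two-pointer sweep over sorted copies, with no list mutation and no binary search.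
import Mathlib
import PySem

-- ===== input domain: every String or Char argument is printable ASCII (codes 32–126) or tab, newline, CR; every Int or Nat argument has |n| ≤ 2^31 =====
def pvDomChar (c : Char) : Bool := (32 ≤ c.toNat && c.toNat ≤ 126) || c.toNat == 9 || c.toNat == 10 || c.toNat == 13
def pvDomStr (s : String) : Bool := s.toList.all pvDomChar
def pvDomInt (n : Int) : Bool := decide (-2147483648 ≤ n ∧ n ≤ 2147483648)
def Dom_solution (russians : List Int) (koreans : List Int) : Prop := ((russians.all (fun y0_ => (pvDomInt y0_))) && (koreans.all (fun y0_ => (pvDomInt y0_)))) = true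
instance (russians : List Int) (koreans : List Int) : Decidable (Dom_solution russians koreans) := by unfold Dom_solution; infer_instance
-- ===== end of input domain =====

-- B replaces A's destructive pop/binary-search loop by a two-pointer sweep over sorted
-- copies; equivalence is about the RETURN value only: A sorts and empties its argument
-- lists in place, B does not mutate them.

-- ===== PORT A =====
-- get_lower_bound: Python's hand-written while-loop binary search over the current
-- koreans list, comparing against r = russians[-1]; recursion on hi - lo.
def getLowerBound (ks : List Int) (r : Int) (lo hi : Int) : Int :=
  if h : lo < hi then
    let mid := PySem.Int.floordiv (hi + lo) 2
    if r ≤ PySem.List.pyGetD ks mid 0 then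
      getLowerBound ks r lo mid
    else
      getLowerBound ks r (mid + 1) hi
  else hi
termination_by (hi - lo).toNat
decreasing_by
  · have h1 : PySem.Int.floordiv (hi + lo) 2 < hi :=
      (PySem.Int.floordiv_lt_iff_lt_mul (by omega)).2 (by omega)
    omega
  · have h1 : PySem.Int.floordiv (hi + lo) 2 < hi :=
      (PySem.Int.floordiv_lt_iff_lt_mul (by omega)).2 (by omega)
    have h2 : lo ≤ PySem.Int.floordiv (hi + lo) 2 :=
      (PySem.Int.le_floordiv_iff_mul_le (by omega)).2 (by omega)
    omega

-- the 'while russians:' loop; pop(-1) = dropLast, pop(0) = tail,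
-- pop(j) = eraseIdx j (the rest component of PySem.List.pop?); the popped values
-- themselves are unused by the Python.  koreans[-1] read via pyGetD (under
-- Pre_ the list is nonempty, exactly where Python does not raise).
def aLoop (russians : List Int) (koreans : List Int) (win : Int) : Int :=
  if hr : russians = [] then win
  else
    let r := PySem.List.pyGetD russians (-1) 0
    if PySem.List.pyGetD koreans (-1) 0 < r then
      aLoop russians.dropLast koreans.tail win
    else
      let j := getLowerBound koreans r 0 ((koreans.length : Int) - 1)
      aLoop russians.dropLast (koreans.eraseIdx j.toNat) (win + 1)
termination_by russians.length
decreasing_by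
  all_goals
    have h1 : russians.dropLast.length = russians.length - 1 := List.length_dropLast
    have h2 : russians.length ≠ 0 := by simpa [List.length_eq_zero_iff] using hr
    omega

def solution (russians : List Int) (koreans : List Int) : Int :=
  aLoop (PySem.List.sorted russians (fun x => x) false)
        (PySem.List.sorted koreans (fun x => x) false) 0

-- ===== PORT B =====
-- the inner 'while j < len(ks) and ks[j] < r: j += 1'
def bSkip (ks : List Int) (r : Int) (j : Nat) : Nat :=
  if h : j < ks.length then
    if ks[j] < r then bSkip ks r (j + 1) else j
  else j
termination_by ks.length - j

def solution_alt (russians : List Int) (koreans : List Int) : Int :=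
  let rs := PySem.List.sorted russians (fun x => x) false
  let ks := PySem.List.sorted koreans (fun x => x) false
  (rs.foldl (fun (st : Int × Nat) r =>
      let j := bSkip ks r st.2
      if j < ks.length then (st.1 + 1, j + 1) else (st.1, j)) (0, 0)).1

-- ===== PRECONDITION & SPEC =====
-- Pre_: exactly where the Python A returns; with fewer koreans than russians the loop
-- empties koreans while russians is nonempty and koreans[-1] raises IndexError.
def Pre_solution (russians : List Int) (koreans : List Int) : Prop :=
  russians.length ≤ koreans.length
instance (russians : List Int) (koreans : List Int) : Decidable (Pre_solution russians koreans) := by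
  unfold Pre_solution; infer_instance

def pvWitness_solution : List Int × List Int := ([2, 1, 3], [2, 2, 4])

def Spec_solution (russians : List Int) (koreans : List Int) (out : Int) : Prop := out = solution_alt russians koreans
instance (russians : List Int) (koreans : List Int) (out : Int) : Decidable (Spec_solution russians koreans out) := by unfold Spec_solution; infer_instance

-- ===== CLAIM (what is proved, stated in full; the proofs are below) =====
def Claim_equal_solution : Prop := ∀ (russians : List Int) (koreans : List Int), Dom_solution russians koreans → Pre_solution russians koreans → Spec_solution russians koreans (solution russians koreans)

-- ===== LEMMAS AND PROOFS =====

-- the clean bottom-up two-pointer recursion both ports are reduced to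
def btp : List Int → List Int → Int
  | [], _ => 0
  | _ :: _, [] => 0
  | r :: rs, k :: ks => if r ≤ k then 1 + btp rs ks else btp (r :: rs) ks
termination_by rs ks => rs.length + ks.length

theorem btp_nil (rs : List Int) : btp rs [] = 0 := by
  cases rs <;> simp [btp]

-- skip a block of koreans all below the head russian
theorem btp_skip (r : Int) (rs K1 K2 : List Int) (h : ∀ k ∈ K1, k < r) :
    btp (r :: rs) (K1 ++ K2) = btp (r :: rs) K2 := by
  induction K1 with
  | nil => rfl
  | cons k K1' ih =>
    have hk : ¬ r ≤ k := by have := h k (by simp); omega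
    simp [btp, hk, ih (fun k hk => h k (by simp [hk]))]

-- L1: a top russian beating every korean never matches
theorem btp_drop_top (r : Int) (R K : List Int) (h : ∀ k ∈ K, k < r) :
    btp (R ++ [r]) K = btp R K := by
  induction K generalizing R with
  | nil => simp [btp_nil]
  | cons k K' ih =>
    have hkr : k < r := h k (by simp)
    cases R with
    | nil =>
      have : ¬ r ≤ k := by omega
      simpa [btp, this, btp_nil] using ih (R := []) (fun k hk => h k (by simp [hk]))
    | cons r0 R'' =>
      by_cases h0 : r0 ≤ k
      · simp only [List.cons_append, btp, if_pos h0]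
        rw [ih (R := R'') (fun k hk => h k (by simp [hk]))]
      · simp only [List.cons_append, btp, if_neg h0]
        exact ih (R := r0 :: R'') (fun k hk => h k (by simp [hk]))

-- L2: with strictly more koreans than russians, the weakest korean is dispensable
theorem btp_drop_worst (R K : List Int) (hs : K.Pairwise (· ≤ ·))
    (hlen : R.length < K.length) : btp R K = btp R K.tail := by
  induction K generalizing R with
  | nil => simp at hlen
  | cons k0 K' ih =>
    cases R with
    | nil => simp [btp]
    | cons r0 R' =>
      by_cases h0 : r0 ≤ k0
      · -- both sides match their first korean
        cases K' with
        | nil => simp at hlen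
        | cons k1 K'' =>
          have hk01 : k0 ≤ k1 := by
            have := hs; simp [List.pairwise_cons] at this; exact this.1.1
          have h1 : r0 ≤ k1 := le_trans h0 hk01
          simp only [btp, if_pos h0, List.tail_cons, if_pos h1]
          have := ih (R := R') (by simp [List.pairwise_cons] at hs ⊢; exact hs.2)
            (by simp at hlen ⊢; omega)
          simpa using this
      · simp only [btp, if_neg h0, List.tail_cons]

-- L4: when every korean beats every russian, the count is min of the lengths
theorem btp_all_win (R K : List Int) (h : ∀ x ∈ R, ∀ k ∈ K, x ≤ k) :
    btp R K = (min R.length K.length : Int) := by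
  induction R generalizing K with
  | nil => simp [btp]
  | cons r R' ih =>
    cases K with
    | nil => rw [btp_nil]; simp only [List.length_cons, List.length_nil]; omega
    | cons k K' =>
      have hrk : r ≤ k := h r (by simp) k (by simp)
      have := ih (K := K') (fun x hx k hk => h x (by simp [hx]) k (by simp [hk]))
      simp only [btp, if_pos hrk, this, List.length_cons]
      omega

-- L3: matching the top russian with the least korean that beats it
theorem btp_match_top (r : Int) (R' Klo Khi : List Int)
    (hR : ∀ x ∈ R', x ≤ r) (hlo : ∀ k ∈ Klo, k < r) (hhi : ∀ k ∈ Khi, r ≤ k)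
    (hne : Khi ≠ []) :
    btp (R' ++ [r]) (Klo ++ Khi) = 1 + btp R' (Klo ++ Khi.tail) := by
  induction Klo generalizing R' with
  | nil =>
    cases R' with
    | nil =>
      obtain ⟨k1, Krest, rfl⟩ := List.exists_cons_of_ne_nil hne
      have : r ≤ k1 := hhi k1 (by simp)
      simp [btp, this]
    | cons r0 R'' =>
      obtain ⟨k1, Krest, rfl⟩ := List.exists_cons_of_ne_nil hne
      have h0r : r0 ≤ r := hR r0 (by simp)
      have h01 : r0 ≤ k1 := le_trans h0r (hhi k1 (by simp))
      simp only [List.nil_append, List.cons_append, btp, if_pos h01, List.tail_cons]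
      have lhs := btp_all_win (R'' ++ [r]) Krest
        (by intro x hx k hk
            have hkr : r ≤ k := hhi k (by simp [hk])
            rcases List.mem_append.1 hx with h | h
            · exact le_trans (hR x (by simp [h])) hkr
            · simp at h; omega)
      have rhs := btp_all_win (r0 :: R'') Krest
        (by intro x hx k hk
            have hkr : r ≤ k := hhi k (by simp [hk])
            rcases List.mem_cons.1 hx with h | h
            · omega
            · exact le_trans (hR x (by simp [h])) hkr)
      rw [lhs, rhs]; simp
  | cons k Klo' ih =>
    have hkr : k < r := hlo k (by simp)
    cases R' with
    | nil =>
      have : ¬ r ≤ k := by omega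
      simp only [List.nil_append, List.cons_append, btp, if_neg this]
      have h2 := ih (R' := []) (by simp) (fun k hk => hlo k (by simp [hk]))
      simp only [List.nil_append] at h2
      rw [h2]; simp [btp]
    | cons r0 R'' =>
      by_cases h0 : r0 ≤ k
      · simp only [List.cons_append, btp, if_pos h0]
        have := ih (R' := R'') (fun x hx => hR x (by simp [hx]))
          (fun k hk => hlo k (by simp [hk]))
        rw [this]
      · simp only [List.cons_append, btp, if_neg h0]
        have h2 := ih (R' := r0 :: R'') hR (fun k hk => hlo k (by simp [hk]))
        rw [List.cons_append] at h2
        exact h2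

-- in a ≤-sorted list, every element is at most the last one
theorem all_le_getLast (l : List Int) (h : l.Pairwise (· ≤ ·)) (hne : l ≠ []) :
    ∀ x ∈ l, x ≤ l.getLast hne := by
  intro x hx
  rw [List.getLast_eq_getElem]
  obtain ⟨i, hi, rfl⟩ := List.mem_iff_getElem.1 hx
  rcases Nat.lt_or_ge i (l.length - 1) with h' | h'
  · exact List.pairwise_iff_getElem.1 h i (l.length - 1) hi (by omega) h'
  · have : i = l.length - 1 := by omega
    subst this; exact le_refl _

theorem sorted_getElem_mono (l : List Int) (h : l.Pairwise (· ≤ ·)) (i j : Nat)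
    (hij : i ≤ j) (hj : j < l.length) : l[i]'(by omega) ≤ l[j] := by
  rcases Nat.lt_or_ge i j with h' | h'
  · exact List.pairwise_iff_getElem.1 h i j (by omega) hj h'
  · have : i = j := by omega
    subst this; exact le_refl _

-- ---- A-side: the binary search finds the least index whose korean beats r ----
theorem getLowerBound_spec (ks : List Int) (r : Int) (hs : ks.Pairwise (· ≤ ·)) :
    ∀ (n : Nat) (lo hi : Int), (hi - lo).toNat = n → 0 ≤ lo → lo ≤ hi →
    hi ≤ (ks.length : Int) - 1 →
    (∀ i : Nat, (i : Int) < lo → ∀ h : i < ks.length, ks[i] < r) →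
    (∀ h : hi.toNat < ks.length, r ≤ ks[hi.toNat]) →
    lo ≤ getLowerBound ks r lo hi ∧ getLowerBound ks r lo hi ≤ hi ∧
      (∀ i : Nat, (i : Int) < getLowerBound ks r lo hi → ∀ h : i < ks.length, ks[i] < r) ∧
      (∀ h : (getLowerBound ks r lo hi).toNat < ks.length,
        r ≤ ks[(getLowerBound ks r lo hi).toNat]) := by
  intro n
  induction n using Nat.strong_induction_on with
  | _ n ih =>
    intro lo hi hn hlo hlh hhi hbelow habove
    by_cases hlt : lo < hi
    · have hm1 : PySem.Int.floordiv (hi + lo) 2 < hi :=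
        (PySem.Int.floordiv_lt_iff_lt_mul (by omega)).2 (by omega)
      have hm2 : lo ≤ PySem.Int.floordiv (hi + lo) 2 :=
        (PySem.Int.le_floordiv_iff_mul_le (by omega)).2 (by omega)
      set mid := PySem.Int.floordiv (hi + lo) 2 with hmid
      have hmlen : mid.toNat < ks.length := by omega
      have hget : PySem.List.pyGetD ks mid 0 = ks[mid.toNat] :=
        PySem.List.pyGetD_eq_getElem ks 0 (by omega) (by omega)
      by_cases hge : r ≤ ks[mid.toNat]
      · have hstep : getLowerBound ks r lo hi = getLowerBound ks r lo mid := by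
          conv_lhs => rw [getLowerBound]
          rw [dif_pos hlt]
          dsimp only
          rw [← hmid, hget, if_pos hge]
        rw [hstep]
        obtain ⟨a, b, c, d⟩ := ih (mid - lo).toNat (by omega) lo mid rfl hlo (by omega)
          (by omega) hbelow (fun _ => hge)
        exact ⟨a, by omega, c, d⟩
      · have hstep : getLowerBound ks r lo hi = getLowerBound ks r (mid + 1) hi := by
          conv_lhs => rw [getLowerBound]
          rw [dif_pos hlt]
          dsimp only
          rw [← hmid, hget, if_neg hge]
        rw [hstep]
        have hbelow' : ∀ i : Nat, (i : Int) < mid + 1 → ∀ h : i < ks.length, ks[i] < r := by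
          intro i hi h
          have : ks[i] ≤ ks[mid.toNat] := sorted_getElem_mono ks hs i mid.toNat (by omega) hmlen
          omega
        obtain ⟨a, b, c, d⟩ := ih (hi - (mid + 1)).toNat (by omega) (mid + 1) hi rfl
          (by omega) (by omega) hhi hbelow' habove
        exact ⟨by omega, b, c, d⟩
    · have hstep : getLowerBound ks r lo hi = hi := by
        rw [getLowerBound, dif_neg hlt]
      rw [hstep]
      have : lo = hi := by omega
      subst this
      exact ⟨le_refl _, le_refl _, hbelow, habove⟩

-- ---- A-side main induction: aLoop equals win + btp on sorted inputs ----
theorem aLoop_eq_btp (n : Nat) : ∀ (rs ks : List Int) (win : Int),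
    rs.length = n → rs.Pairwise (· ≤ ·) → ks.Pairwise (· ≤ ·) →
    rs.length ≤ ks.length → aLoop rs ks win = win + btp rs ks := by
  induction n with
  | zero =>
    intro rs ks win hlen _ _ _
    have : rs = [] := List.length_eq_zero_iff.1 hlen
    subst this
    rw [aLoop]
    simp [btp]
  | succ n ihn =>
    intro rs ks win hlen hrs hks hlk
    have hrne : rs ≠ [] := by
      intro h; subst h; simp at hlen
    have hkne : ks ≠ [] := by
      intro h; subst h; simp only [List.length_nil, Nat.le_zero] at hlk; omega
    have hdl : rs.dropLast ++ [rs.getLast hrne] = rs := List.dropLast_append_getLast hrne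
    have hdlen : rs.dropLast.length = n := by
      have : rs.dropLast.length = rs.length - 1 := List.length_dropLast
      omega
    have hrget : PySem.List.pyGetD rs (-1) 0 = rs.getLast hrne :=
      PySem.List.pyGetD_neg_one rs 0 hrne
    have hkget : PySem.List.pyGetD ks (-1) 0 = ks.getLast hkne :=
      PySem.List.pyGetD_neg_one ks 0 hkne
    set r := rs.getLast hrne with hr
    have hRle : ∀ x ∈ rs.dropLast, x ≤ r := by
      intro x hx
      exact all_le_getLast rs hrs hrne x (by rw [← hdl]; exact List.mem_append_left _ hx)
    rw [aLoop, dif_neg hrne]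
    simp only [hrget, hkget]
    by_cases hc : ks.getLast hkne < r
    · rw [if_pos hc]
      have hall : ∀ k ∈ ks, k < r :=
        fun k hk => lt_of_le_of_lt (all_le_getLast ks hks hkne k hk) hc
      rw [ihn rs.dropLast ks.tail win hdlen
        (List.Pairwise.sublist (List.dropLast_sublist rs) hrs)
        (List.Pairwise.sublist (List.tail_sublist ks) hks)
        (by simp only [List.length_tail]; omega)]
      congr 1
      have h5 : btp rs ks = btp rs.dropLast ks := by
        conv_lhs => rw [← hdl]
        exact btp_drop_top r rs.dropLast ks hall
      rw [h5]
      exact (btp_drop_worst rs.dropLast ks hks (by omega)).symm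
    · rw [if_neg hc]
      have hge : r ≤ ks.getLast hkne := by omega
      have hlen1 : 1 ≤ ks.length := by
        have := List.length_pos_of_ne_nil hkne; omega
      obtain ⟨a, b, c, d⟩ := getLowerBound_spec ks r hks
        (((ks.length : Int) - 1) - 0).toNat 0 ((ks.length : Int) - 1) rfl
        (le_refl 0) (by omega) (by omega)
        (by intro i hi h; omega)
        (by intro h
            refine le_trans (by rw [← List.getLast_eq_getElem hkne]; exact hge)
              (sorted_getElem_mono ks hks (ks.length - 1) _ (by omega) h))
      set j := getLowerBound ks r 0 ((ks.length : Int) - 1) with hj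
      set jn := j.toNat with hjn
      have hjlen : jn < ks.length := by omega
      have hksj : r ≤ ks[jn] := d (by omega)
      have hlo_take : ∀ k ∈ ks.take jn, k < r := by
        intro k hk
        obtain ⟨i, hi, rfl⟩ := List.mem_iff_getElem.1 hk
        have hi' : i < jn := by
          simp only [List.length_take] at hi; omega
        rw [List.getElem_take]
        exact c i (by omega) (by omega)
      have hhi_drop : ∀ k ∈ ks.drop jn, r ≤ k := by
        intro k hk
        obtain ⟨i, hi, rfl⟩ := List.mem_iff_getElem.1 hk
        rw [List.getElem_drop]
        have hlen2 : jn + i < ks.length := by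
          simp only [List.length_drop] at hi; omega
        exact le_trans hksj (sorted_getElem_mono ks hks jn (jn + i) (by omega) hlen2)
      have hdne : ks.drop jn ≠ [] := by
        rw [Ne, List.drop_eq_nil_iff]; omega
      have hmatch : btp rs ks = 1 + btp rs.dropLast (ks.eraseIdx jn) := by
        conv_lhs => rw [← hdl, ← List.take_append_drop jn ks]
        rw [btp_match_top r rs.dropLast (ks.take jn) (ks.drop jn) hRle hlo_take hhi_drop hdne]
        rw [List.eraseIdx_eq_take_drop_succ, ← List.tail_drop]
      rw [ihn rs.dropLast (ks.eraseIdx jn) (win + 1) hdlen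
        (List.Pairwise.sublist (List.dropLast_sublist rs) hrs)
        (List.Pairwise.sublist (List.eraseIdx_sublist ks jn) hks)
        (by rw [List.length_eraseIdx]; simp [hjlen]; omega)]
      rw [hmatch]
      ring

-- ---- B-side: the fold with bSkip equals btp ----
theorem dropWhile_eq_cons_head (p : Int → Bool) (l : List Int) (x : Int) (xs : List Int)
    (h : l.dropWhile p = x :: xs) : p x = false := by
  induction l with
  | nil => simp at h
  | cons a l ih =>
    rw [List.dropWhile_cons] at h
    by_cases hp : p a
    · exact ih (by simpa [hp] using h)
    · simp [hp] at h
      simp [← h.1, hp]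

theorem bSkip_spec (ks : List Int) (r : Int) (j : Nat) (hj : j ≤ ks.length) :
    j ≤ bSkip ks r j ∧ bSkip ks r j ≤ ks.length ∧
      ks.drop (bSkip ks r j) = (ks.drop j).dropWhile (fun k => decide (k < r)) := by
  fun_induction bSkip ks r j with
  | case1 j h hlt ih =>
    obtain ⟨h1, h2, h3⟩ := ih (by omega)
    refine ⟨by omega, h2, ?_⟩
    rw [h3, List.drop_eq_getElem_cons h, List.dropWhile_cons]
    simp [hlt]
  | case2 j h hlt =>
    refine ⟨le_refl _, by omega, ?_⟩
    rw [List.drop_eq_getElem_cons h, List.dropWhile_cons]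
    simp [hlt]
  | case3 j h =>
    have : j = ks.length := by omega
    subst this
    simp [List.drop_length]

theorem fold_eq_btp (ks : List Int) : ∀ (rs : List Int) (c : Int) (j : Nat), j ≤ ks.length →
    (rs.foldl (fun (st : Int × Nat) r =>
      let j := bSkip ks r st.2
      if j < ks.length then (st.1 + 1, j + 1) else (st.1, j)) (c, j)).1
    = c + btp rs (ks.drop j) := by
  intro rs
  induction rs with
  | nil => intro c j hj; simp [btp]
  | cons r rs ih =>
    intro c j hj
    obtain ⟨h1, h2, h3⟩ := bSkip_spec ks r j hj
    set j' := bSkip ks r j with hj'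
    have hskip : btp (r :: rs) (ks.drop j) = btp (r :: rs) (ks.drop j') := by
      conv_lhs => rw [← List.takeWhile_append_dropWhile
        (p := fun k => decide (k < r)) (l := ks.drop j)]
      rw [btp_skip r rs _ _ (fun k hk => by simpa using List.mem_takeWhile_imp hk), ← h3]
    simp only [List.foldl_cons, ← hj']
    by_cases hlt : j' < ks.length
    · have hdrop : ks.drop j' = ks[j'] :: ks.drop (j' + 1) := List.drop_eq_getElem_cons hlt
      have hstop : ¬ ks[j']'hlt < r := by
        have := dropWhile_eq_cons_head _ _ _ _ (h3 ▸ hdrop)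
        simpa using this
      rw [if_pos hlt, ih (c + 1) (j' + 1) (by omega)]
      rw [hskip, hdrop]
      simp only [btp, if_pos (by omega : r ≤ ks[j']'hlt)]
      ring
    · have hj'' : j' = ks.length := by omega
      rw [if_neg hlt, ih c j' h2, hskip, hj'', List.drop_length, btp_nil, btp_nil]

-- ===== VERDICT (by name: the statement is the Claim_ definition above) =====
theorem solution_spec : Claim_equal_solution := by
  intro russians koreans _ hpre
  unfold Spec_solution solution solution_alt
  set rs := PySem.List.sorted russians (fun x => x) false with hrs
  set ks := PySem.List.sorted koreans (fun x => x) false with hks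
  have hlr : rs.length = russians.length := PySem.List.length_sorted _ _ _
  have hlk : ks.length = koreans.length := PySem.List.length_sorted _ _ _
  have hA : aLoop rs ks 0 = 0 + btp rs ks :=
    aLoop_eq_btp rs.length rs ks 0 rfl
      (PySem.List.sorted_pairwise russians (fun x => x))
      (PySem.List.sorted_pairwise koreans (fun x => x))
      (by unfold Pre_solution at hpre; omega)
  have hB := fold_eq_btp ks rs 0 0 (by omega)
  rw [hA]
  simp only [List.drop_zero] at hB
  rw [hB]
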